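-- pv_equiv track=rewrite | github.com/LuckyN510/CODE_PTIT | PYTHON/ICPC0106_DOI CO SO-2.py | binTo
-- ===== SOURCE A (Python) =====
-- import math
--
-- def binTo(s, n):
--     k = int(math.log(n, 2))
--     while len(s) % k != 0:
--         s = '0' + s
--     res = ""
--     for i in range(0, len(s), k):
--         group = s[i : i + k]
--         d = int(group, 2)
--         if d <= 9:
--             res += str(d)
--         else :
--             res += chr(ord('A') + d - 10)
--     return res
-- ===== SOURCE B (Python) =====
-- import math
--
-- def binTo(s, n):
--     # One integer-to-base conversion instead of padding + per-group slicing.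
--     k = int(math.log(n, 2))
--     if not s:
--         return ""
--     v = int(s, 2)
--     m = 1 << k
--     g = (len(s) + k - 1) // k        # number of output digits = ceil(len(s)/k)
--     out = []
--     for _ in range(g):
--         d = v % m
--         v //= m
--         out.append(str(d) if d <= 9 else chr(ord('A') + d - 10))
--     return ''.join(reversed(out))
-- ===== Notes on version B (the rewrite author's own statement) =====
-- stated objective: alternative
-- what changed: B replaces A's pad-with-zeros-then-slice-each-k-bit-group loop by a single int(s,2) conversion followed by repeated mod/div extraction of ceil(len(s)/k) base-2^k digits (collected least-significant-first, then reversed), with an up-front empty-string case.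
-- outside the precondition, e.g. on binTo(' ', 66): A returns '0', B raises ValueError; on binTo('1', 65536): A returns '1', B returns '1'
import Mathlib
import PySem

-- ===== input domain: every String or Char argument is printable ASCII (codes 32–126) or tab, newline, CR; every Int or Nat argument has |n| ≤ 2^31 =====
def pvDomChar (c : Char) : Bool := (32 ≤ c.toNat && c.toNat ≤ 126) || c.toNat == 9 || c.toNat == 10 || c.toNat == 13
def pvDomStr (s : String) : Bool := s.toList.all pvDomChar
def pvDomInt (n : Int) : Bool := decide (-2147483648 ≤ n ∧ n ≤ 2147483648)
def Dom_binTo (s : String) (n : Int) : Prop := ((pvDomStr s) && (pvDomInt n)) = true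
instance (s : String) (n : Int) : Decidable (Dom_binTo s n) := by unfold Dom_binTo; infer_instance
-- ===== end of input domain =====

-- B replaces A's pad-then-slice-per-group loop by ONE binary-string-to-integer conversion followed by
-- repeated mod/div digit extraction (objective: alternative single-conversion algorithm, same cost class).

-- k = int(math.log(n, 2)) — shared by both Pythons; equals floor(log2 n) = Nat.log2, verified exhaustively
-- against CPython for all 2 ≤ n ≤ 2^17 (Pre_ caps n below 2^16) and at every power of two up to 2^31.
def pyLog2Int (n : Int) : Nat := Nat.log2 n.toNat

-- int(g, 2) — hand port, exact on strings of '0'/'1' digits (guaranteed by Pre_; Python raises ValueError elsewhere)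
def bin2Nat (l : List Char) : Nat := l.foldl (fun a c => 2 * a + (if c = '1' then 1 else 0)) 0

-- 'str(d) if d <= 9 else chr(ord('A') + d - 10)' — shared digit-to-character mapping of both Pythons
-- (exact: Pre_ keeps n < 2^16, so 65 + d - 10 stays below the surrogate range and is a valid scalar)
def digitChar (d : Nat) : Char := if d ≤ 9 then Char.ofNat (48 + d) else Char.ofNat (65 + d - 10)

-- ===== PORT A =====
-- "while len(s) % k != 0: s = '0' + s"  (the k = 0 guard only totalises: Python raises ZeroDivisionError there, outside Pre_)
def binToPad (s : List Char) (k : Nat) : List Char :=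
  if k = 0 then s
  else if s.length % k = 0 then s
  else binToPad ('0' :: s) k
termination_by (k - s.length % k) % k
decreasing_by
  rename_i hk h
  simp only [List.length_cons]
  have hk2 : 2 ≤ k := by
    rcases k with _ | _ | k
    · exact absurd rfl hk
    · simp [Nat.mod_one] at h
    · omega
  have hr : s.length % k < k := Nat.mod_lt _ (by omega)
  have h1 : (s.length + 1) % k = (s.length % k + 1) % k := by
    rw [Nat.add_mod, Nat.mod_eq_of_lt (show 1 < k by omega)]
  have e2 : (k - s.length % k) % k = k - s.length % k := Nat.mod_eq_of_lt (by omega)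
  rcases Nat.lt_or_ge (s.length % k + 1) k with hlt | hge
  · have e1 : (k - (s.length + 1) % k) % k = k - (s.length % k + 1) := by
      rw [h1, Nat.mod_eq_of_lt hlt, Nat.mod_eq_of_lt (by omega)]
    rw [e1, e2]
    omega
  · have hek : s.length % k + 1 = k := by omega
    have e1 : (k - (s.length + 1) % k) % k = 0 := by
      rw [h1, hek, Nat.mod_self, Nat.sub_zero, Nat.mod_self]
    rw [e1, e2]
    omega

def binTo (s : String) (n : Int) : String :=
  let k := pyLog2Int n
  let t := binToPad s.toList k
  let res := (PySem.List.pyRange 0 (t.length : Int) (k : Int)).foldl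
    (fun res i =>
      let group := PySem.List.slice t (some i) (some (i + (k : Int)))  -- s[i : i + k]
      let d := bin2Nat group
      res ++ [digitChar d]) ([] : List Char)
  String.ofList res

-- ===== PORT B =====
def binTo_alt (s : String) (n : Int) : String :=
  let k := pyLog2Int n
  if s.toList = [] then ""
  else
    let v := bin2Nat s.toList          -- v = int(s, 2)
    let m := 1 <<< k                   -- m = 1 << k
    let g := (s.toList.length + k - 1) / k   -- ceil(len(s)/k); nonneg operands, so Python's // is Nat division
    -- 'for _ in range(g): d = v % m; v //= m; out.append(digit)' — v stays nonneg, so //= is Nat division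
    let r := (List.range g).foldl
      (fun (acc : List Char × Nat) _ =>
        (acc.1 ++ [digitChar (acc.2 % m)], acc.2 / m)) (([] : List Char), v)
    String.ofList r.1.reverse              -- ''.join(reversed(out))

-- ===== PRECONDITION & SPEC =====
-- Pre_ = n ≥ 2 (n ≤ 1 raises ZeroDivisionError / math-domain error) and s made of binary digits only: on other
-- strings int(group, 2) usually raises, and the corner strings it still accepts (pure whitespace, on which A's
-- zero-padding lets int('00...0 ', 2) return 0 while B's int(s, 2) raises) are an artefact of A's padding — excluded.
-- It also excludes n ≥ 2^16, on which A still returns for short inputs but where a k-bit group can make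
-- chr(ord('A')+d-10) land in the Unicode surrogate range or raise ValueError — characters a Lean Char/String
-- cannot represent, so the ports are only claimed below 2^16.
def Pre_binTo (s : String) (n : Int) : Prop :=
  2 ≤ n ∧ n < 65536 ∧ s.toList.all (fun c => c == '0' || c == '1') = true
instance (s : String) (n : Int) : Decidable (Pre_binTo s n) := by unfold Pre_binTo; infer_instance

def pvWitness_binTo : String × Int := ("10111", 16)

def Spec_binTo (s : String) (n : Int) (out : String) : Prop := out = binTo_alt s n
instance (s : String) (n : Int) (out : String) : Decidable (Spec_binTo s n out) := by unfold Spec_binTo; infer_instance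

-- ===== CLAIM (what is proved, stated in full; the proofs are below) =====
def Claim_equal_binTo : Prop := ∀ (s : String) (n : Int), Dom_binTo s n → Pre_binTo s n → Spec_binTo s n (binTo s n)

-- ===== LEMMAS AND PROOFS =====

-- A's groups, processed front to back (proof-side reference shape)
def chunkDigits (k : Nat) : Nat → List Char → List Char
  | 0, _ => []
  | g+1, t => digitChar (bin2Nat (t.take k)) :: chunkDigits k g (t.drop k)

-- B's digits, least significant first (proof-side reference shape)
def lsbDigits (m : Nat) : Nat → Nat → List Nat
  | 0, _ => []
  | g+1, v => v % m :: lsbDigits m g (v / m)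

theorem bin2Nat_foldl (l : List Char) (a : Nat) :
    l.foldl (fun a c => 2 * a + (if c = '1' then 1 else 0)) a = a * 2 ^ l.length + bin2Nat l := by
  induction l generalizing a with
  | nil => simp [bin2Nat]
  | cons c l ih =>
    simp only [List.foldl_cons, List.length_cons, bin2Nat] at *
    rw [ih, ih (2 * 0 + if c = '1' then 1 else 0)]
    ring

theorem bin2Nat_lt (l : List Char) : bin2Nat l < 2 ^ l.length := by
  induction l with
  | nil => simp [bin2Nat]
  | cons c l ih =>
    have hb : (if c = '1' then 1 else 0) ≤ 1 := by split <;> omega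
    simp only [bin2Nat, List.foldl_cons, List.length_cons] at *
    rw [bin2Nat_foldl]
    have h2 : (2:Nat) ^ (l.length + 1) = 2 ^ l.length + 2 ^ l.length := by ring
    simp only [bin2Nat] at *
    nlinarith

theorem bin2Nat_append (x y : List Char) :
    bin2Nat (x ++ y) = bin2Nat x * 2 ^ y.length + bin2Nat y := by
  simp only [bin2Nat, List.foldl_append]
  rw [bin2Nat_foldl]
  rfl

theorem binToPad_eq (s : List Char) (k : Nat) (hk : k ≠ 0) :
    binToPad s k = List.replicate ((k - s.length % k) % k) '0' ++ s := by
  fun_induction binToPad s k with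
  | case1 s h => exact absurd h hk
  | case2 s hk0 h => simp [h, Nat.mod_self]
  | case3 s hk0 h ih =>
    rw [ih]
    have hk2 : 2 ≤ k := by
      rcases k with _ | _ | k
      · exact absurd rfl hk
      · simp [Nat.mod_one] at h
      · omega
    have hr : s.length % k < k := Nat.mod_lt _ (by omega)
    have h1 : ('0' :: s).length % k = (s.length % k + 1) % k := by
      simp only [List.length_cons]
      rw [Nat.add_mod, Nat.mod_eq_of_lt (show 1 < k by omega)]
    have e2 : (k - s.length % k) % k = k - s.length % k := Nat.mod_eq_of_lt (by omega)
    have key : (k - ('0' :: s).length % k) % k + 1 = (k - s.length % k) % k := by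
      rcases Nat.lt_or_ge (s.length % k + 1) k with hlt | hge
      · rw [h1, Nat.mod_eq_of_lt hlt, Nat.mod_eq_of_lt (by omega), e2]
        omega
      · have hek : s.length % k + 1 = k := by omega
        rw [h1, hek, Nat.mod_self, Nat.sub_zero, Nat.mod_self, e2]
        omega
    calc List.replicate ((k - ('0' :: s).length % k) % k) '0' ++ '0' :: s
        = List.replicate ((k - ('0' :: s).length % k) % k + 1) '0' ++ s := by
          rw [List.replicate_succ', List.append_assoc]
          rfl
      _ = List.replicate ((k - s.length % k) % k) '0' ++ s := by rw [key]


theorem pyRange_step (g k : Nat) (hk : 0 < k) :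
    PySem.List.pyRange 0 ((g * k : Nat) : Int) (k : Int)
      = (List.range g).map (fun j => ((j * k : Nat) : Int)) := by
  rw [PySem.List.pyRange_of_pos 0 _ (by exact_mod_cast hk)]
  have hcount : (if (0:Int) < ((g * k : Nat) : Int) then ((((g * k : Nat) : Int) - 0 + (k:Int) - 1) / (k:Int)).toNat else 0) = g := by
    split
    · rename_i hpos
      have : (((g * k : Nat) : Int) - 0 + (k:Int) - 1) = (((g * k + k - 1 : Nat)) : Int) := by
        push_cast
        omega
      rw [this, ← Int.natCast_div]
      have : (g * k + k - 1) / k = g := by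
        have h1 : g * k + k - 1 = k * g + (k - 1) := by
          rcases g with _ | g
          · omega
          · ring_nf
            omega
        rw [h1, Nat.mul_add_div hk, Nat.div_eq_of_lt (by omega)]
        omega
      simp [this]
    · rename_i hnp
      have : g * k = 0 := by
        by_contra hc
        exact hnp (by exact_mod_cast Nat.pos_of_ne_zero hc)
      have : g = 0 := by
        rcases Nat.mul_eq_zero.mp this with h | h
        · exact h
        · omega
      omega
  rw [hcount]
  apply List.map_congr_left
  intro j hj
  push_cast
  ring

theorem chunkDigits_eq_map (k : Nat) (g : Nat) (t : List Char) :
    (List.range g).map (fun j => digitChar (bin2Nat ((t.drop (j * k)).take k))) = chunkDigits k g t := by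
  induction g generalizing t with
  | zero => rfl
  | succ g ih =>
    rw [List.range_succ_eq_map, List.map_cons, List.map_map]
    simp only [chunkDigits, Nat.zero_mul, List.drop_zero]
    congr 1
    rw [← ih (t.drop k)]
    apply List.map_congr_left
    intro j hj
    simp only [Function.comp_apply, List.drop_drop]
    have hidx : j.succ * k = k + k * j := by rw [Nat.succ_eq_add_one]; ring
    rw [hidx, Nat.mul_comm j k]

theorem lsbDigits_last (m g : Nat) (v : Nat) (hv : v < m ^ (g + 1)) :
    lsbDigits m (g + 1) v = lsbDigits m g (v % m ^ g) ++ [v / m ^ g] := by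
  induction g generalizing v with
  | zero =>
    have hv1 : v < m := by simpa using hv
    simp [lsbDigits, Nat.mod_eq_of_lt hv1, Nat.div_one]
  | succ g ih =>
    have hdm : v / m < m ^ (g + 1) := by
      rcases Nat.eq_zero_or_pos m with hm | hm
      · subst hm
        simp at hv
      · rw [Nat.div_lt_iff_lt_mul hm]
        calc v < m ^ (g + 1 + 1) := hv
          _ = m ^ (g + 1) * m := by ring
    have e1 : v % m ^ (g + 1) % m = v % m := Nat.mod_mod_of_dvd v (dvd_pow_self m (by omega))
    have e2 : v % m ^ (g + 1) / m = v / m % m ^ g := by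
      have : m ^ (g + 1) = m * m ^ g := by ring
      rw [this, Nat.mod_mul_right_div_self]
    have e3 : v / m / m ^ g = v / m ^ (g + 1) := by
      rw [Nat.div_div_eq_div_mul]
      congr 1
      ring
    calc lsbDigits m (g + 1 + 1) v = v % m :: lsbDigits m (g + 1) (v / m) := rfl
      _ = v % m :: (lsbDigits m g (v / m % m ^ g) ++ [v / m / m ^ g]) := by rw [ih _ hdm]
      _ = (v % m ^ (g + 1) % m :: lsbDigits m g (v % m ^ (g + 1) / m)) ++ [v / m ^ (g + 1)] := by
          rw [e1, e2, e3]
          simp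
      _ = lsbDigits m (g + 1) (v % m ^ (g + 1)) ++ [v / m ^ (g + 1)] := rfl

theorem chunkDigits_eq_lsb (k : Nat) (_hk : 0 < k) (g : Nat) (t : List Char) (ht : t.length = g * k) :
    chunkDigits k g t = ((lsbDigits (2 ^ k) g (bin2Nat t)).reverse).map digitChar := by
  induction g generalizing t with
  | zero => simp [chunkDigits, lsbDigits]
  | succ g ih =>
    have hsplit : t = t.take k ++ t.drop k := (List.take_append_drop k t).symm
    have hlen : (t.drop k).length = g * k := by
      simp [List.length_drop, ht, Nat.succ_mul]
    have hlt : bin2Nat (t.drop k) < 2 ^ (g * k) := by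
      have := bin2Nat_lt (t.drop k)
      rwa [hlen] at this
    have hval : bin2Nat t = bin2Nat (t.take k) * 2 ^ (g * k) + bin2Nat (t.drop k) := by
      conv_lhs => rw [hsplit]
      rw [bin2Nat_append, hlen]
    have hpow : (2 ^ k) ^ g = 2 ^ (g * k) := by
      rw [← pow_mul]
      ring_nf
    have hvlt : bin2Nat t < (2 ^ k) ^ (g + 1) := by
      have h1 := bin2Nat_lt t
      rw [ht] at h1
      have : (2:Nat) ^ ((g + 1) * k) = (2 ^ k) ^ (g + 1) := by rw [← pow_mul]; ring_nf
      rwa [this] at h1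
    have hmod : bin2Nat t % (2 ^ k) ^ g = bin2Nat (t.drop k) := by
      rw [hpow, hval, Nat.mul_add_mod', Nat.mod_eq_of_lt hlt]
    have hdiv : bin2Nat t / (2 ^ k) ^ g = bin2Nat (t.take k) := by
      rw [hpow, hval, Nat.add_comm, Nat.add_mul_div_right _ _ (Nat.pow_pos (by omega)), Nat.div_eq_of_lt hlt]
      omega
    rw [lsbDigits_last _ _ _ hvlt, List.reverse_append, hmod, hdiv]
    simp only [List.reverse_singleton, List.singleton_append, List.map_cons, chunkDigits]
    rw [ih _ hlen]

theorem foldlB (m : Nat) (g : Nat) (v : Nat) (out : List Char) :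
    (List.range g).foldl (fun (acc : List Char × Nat) _ =>
        (acc.1 ++ [digitChar (acc.2 % m)], acc.2 / m)) (out, v)
      = (out ++ (lsbDigits m g v).map digitChar, v / m ^ g) := by
  induction g generalizing v out with
  | zero => simp [lsbDigits]
  | succ g ih =>
    rw [List.range_succ_eq_map, List.foldl_cons, List.foldl_map]
    rw [ih (v / m) (out ++ [digitChar (v % m)])]
    simp only [lsbDigits, List.map_cons, List.append_assoc, List.singleton_append]
    congr 1
    rw [Nat.div_div_eq_div_mul, pow_succ, Nat.mul_comm]

theorem bin2Nat_replicate_zero (p : Nat) : bin2Nat (List.replicate p '0') = 0 := by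
  induction p with
  | zero => rfl
  | succ p ih => simpa [bin2Nat, List.replicate_succ, List.foldl_cons] using ih

-- ===== VERDICT (by name: the statement is the Claim_ definition above) =====
theorem binTo_spec : Claim_equal_binTo := by
  unfold Claim_equal_binTo
  intro s n _ hpre
  obtain ⟨h2, _, _⟩ := hpre
  unfold Spec_binTo binTo binTo_alt
  simp only []
  set k := pyLog2Int n with hkdef
  have hk : 0 < k := by
    have h2' : (2:Nat) ≤ n.toNat := by omega
    have h1 : 1 ≤ Nat.log2 n.toNat := (Nat.le_log2 (by omega)).mpr (by simpa using h2')
    simpa [hkdef, pyLog2Int] using h1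
  set L := s.toList with hL
  by_cases hnil : L = []
  · -- empty string: both sides are ""
    rw [if_pos hnil]
    rw [hnil]
    rw [binToPad_eq [] k (by omega)]
    have h0 : PySem.List.pyRange 0 (0 : Int) (k : Int) = [] := by
      simpa using pyRange_step 0 k hk
    simp [h0, Nat.mod_self]
  · rw [if_neg hnil]
    have hlen1 : 1 ≤ L.length := by
      rcases L with _ | _
      · exact absurd rfl hnil
      · simp
    -- notation
    set r := L.length % k with hrdef
    set q := L.length / k with hqdef
    have hdm : k * q + r = L.length := Nat.div_add_mod L.length k
    have hrk : r < k := Nat.mod_lt _ hk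
    set p := (k - r) % k with hpdef
    set g := (L.length + k - 1) / k with hgdef
    -- g = ceil(len/k) and the padded length is g*k
    have hg : p + L.length = g * k := by
      have hqk : q * k = k * q := Nat.mul_comm q k
      have hq1k : (q + 1) * k = k * q + k := by ring
      by_cases hr0 : r = 0
      · have hsum : L.length + k - 1 = k * q + (k - 1) := by omega
        have hdiv := Nat.mul_add_div hk (x := q) (y := k - 1)
        have h0 : (k - 1) / k = 0 := Nat.div_eq_of_lt (by omega)
        have hgq : g = q := by
          rw [hgdef, hsum, hdiv, h0]
          omega
        have hp0 : p = 0 := by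
          rw [hpdef, hr0, Nat.sub_zero, Nat.mod_self]
        rw [hgq, hp0]
        omega
      · have hkq1 : k * (q + 1) = k * q + k := by ring
        have hsum : L.length + k - 1 = k * (q + 1) + (r - 1) := by omega
        have hdiv := Nat.mul_add_div hk (x := q + 1) (y := r - 1)
        have h0 : (r - 1) / k = 0 := Nat.div_eq_of_lt (by omega)
        have hgq : g = q + 1 := by
          rw [hgdef, hsum, hdiv, h0]
        have hp : p = k - r := by
          rw [hpdef, Nat.mod_eq_of_lt (by omega)]
        rw [hgq, hp]
        omega
    -- the padded list
    rw [binToPad_eq L k (by omega)]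
    set t := List.replicate p '0' ++ L with htdef
    have hlt : t.length = g * k := by
      rw [htdef]
      simp only [List.length_append, List.length_replicate]
      omega
    have hvt : bin2Nat t = bin2Nat L := by
      rw [htdef, bin2Nat_append, bin2Nat_replicate_zero]
      omega
    -- A's loop = chunkDigits
    have hA : (PySem.List.pyRange 0 (t.length : Int) (k : Int)).foldl
        (fun res i => res ++ [digitChar (bin2Nat (PySem.List.slice t (some i) (some (i + (k : Int)))))])
        ([] : List Char) = chunkDigits k g t := by
      rw [hlt]
      rw [show ((g * k : Nat) : Int) = (((g * k : Nat) : Nat) : Int) from rfl]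
      rw [pyRange_step g k hk]
      rw [PySem.List.foldl_append_singleton_eq_map
        (fun i => digitChar (bin2Nat (PySem.List.slice t (some i) (some (i + (k : Int))))))]
      rw [List.map_map, List.nil_append]
      rw [← chunkDigits_eq_map k g t]
      apply List.map_congr_left
      intro j hj
      simp only [Function.comp_apply]
      rw [PySem.List.slice_natCast_add t (j * k) k]
    rw [hA]
    -- B's loop
    rw [Nat.one_shiftLeft]
    rw [foldlB (2 ^ k) g (bin2Nat L) []]
    simp only [List.nil_append]
    -- tie the two together
    rw [chunkDigits_eq_lsb k hk g t hlt, hvt, ← List.map_reverse]
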